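-- pv_equiv track=rewrite | github.com/NahinM/CSE331 | Checkers/python/package/CheckerFuns/checkerFun_kkp_Fall25.py | question21
-- ===== SOURCE A (Python) =====
-- def question21(L:str) -> bool:
--     zero,one = 0,0
--     for c in L:
--         if c=='0':
--             zero+=1
--             one = 0
--         else: one+=1
--         if zero>=2: return False
--         if one>=2: return True
--     return True
-- ===== SOURCE B (Python) =====
-- def second_zero(L: str):
--     """Index of the second '0' in L, or None."""
--     seen = False
--     for i, c in enumerate(L):
--         if c == '0':
--             if seen:
--                 return i
--             seen = True
--     return None
--
-- def first_double(L: str):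
--     """Smallest i with L[i] != '0' and L[i-1] != '0', or None."""
--     prev_nonzero = False
--     for i, c in enumerate(L):
--         if c != '0':
--             if prev_nonzero:
--                 return i
--             prev_nonzero = True
--         else:
--             prev_nonzero = False
--     return None
--
-- def question21(L: str) -> bool:
--     q = second_zero(L)
--     p = first_double(L)
--     if q is None:
--         return True
--     if p is None:
--         return False
--     return p < q
-- ===== Notes on version B (the rewrite author's own statement) =====
-- stated objective: alternative
-- what changed: Replaces A's single accumulate-and-early-return loop over zero/one counters by computing the position of each terminating event separately (index of the second '0', index of the first adjacent pair of non-'0' chars) and comparing which occurs first.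
import Mathlib
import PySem

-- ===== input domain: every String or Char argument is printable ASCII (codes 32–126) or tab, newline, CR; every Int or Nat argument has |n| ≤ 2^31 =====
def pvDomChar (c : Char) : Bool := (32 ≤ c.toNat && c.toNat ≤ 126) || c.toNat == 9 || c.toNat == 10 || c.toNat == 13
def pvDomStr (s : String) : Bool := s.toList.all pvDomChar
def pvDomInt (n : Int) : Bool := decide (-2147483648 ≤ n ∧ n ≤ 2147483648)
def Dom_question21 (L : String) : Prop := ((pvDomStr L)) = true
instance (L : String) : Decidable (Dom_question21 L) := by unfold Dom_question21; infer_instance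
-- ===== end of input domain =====

-- B replaces A's accumulate-and-early-return loop by two event-position scans
-- (index of the second '0', index of the first adjacent non-'0' pair) compared
-- at the end; objective: alternative decomposition, same cost.

-- ===== PORT A =====
-- the loop of A: counters zero/one, early returns ported as results
def q21LoopA : List Char → Nat → Nat → Bool
  | [], _, _ => true
  | c :: cs, z, one =>
    let zero' := if c = '0' then z + 1 else z
    let one' := if c = '0' then 0 else one + 1
    if zero' ≥ 2 then false
    else if one' ≥ 2 then true
    else q21LoopA cs zero' one'

def question21 (L : String) : Bool := q21LoopA L.toList 0 0

-- ===== PORT B =====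
-- Source B second_zero: index of the second '0', or none
def q21SecondZero : List Char → Bool → Nat → Option Nat
  | [], _, _ => none
  | c :: cs, seen, i =>
    if c = '0' then (if seen then some i else q21SecondZero cs true (i + 1))
    else q21SecondZero cs seen (i + 1)

-- Source B first_double: smallest i with L[i] ≠ '0' and L[i-1] ≠ '0', or none
def q21FirstDouble : List Char → Bool → Nat → Option Nat
  | [], _, _ => none
  | c :: cs, prev, i =>
    if c ≠ '0' then (if prev then some i else q21FirstDouble cs true (i + 1))
    else q21FirstDouble cs false (i + 1)

def question21_alt (L : String) : Bool :=
  match q21SecondZero L.toList false 0, q21FirstDouble L.toList false 0 with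
  | none, _ => true
  | some _, none => false
  | some q, some p => p < q

-- ===== PRECONDITION & SPEC =====
def Spec_question21 (L : String) (out : Bool) : Prop := out = question21_alt L
instance (L : String) (out : Bool) : Decidable (Spec_question21 L out) := by unfold Spec_question21; infer_instance

-- ===== CLAIM (what is proved, stated in full; the proofs are below) =====
def Claim_equal_question21 : Prop := ∀ (L : String), Dom_question21 L → Spec_question21 L (question21 L)

-- ===== LEMMAS AND PROOFS =====

-- index-free event positions, used only by the proof
def q21S1 : List Char → Option Nat
  | [] => none
  | c :: cs => if c = '0' then some 0 else (q21S1 cs).map (· + 1)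

def q21S2 : List Char → Option Nat
  | [] => none
  | c :: cs => if c = '0' then (q21S1 cs).map (· + 1) else (q21S2 cs).map (· + 1)

mutual
  def q21D1 : List Char → Option Nat
    | [] => none
    | c :: cs => if c = '0' then (q21D2 cs).map (· + 1) else some 0
  def q21D2 : List Char → Option Nat
    | [] => none
    | c :: cs => if c = '0' then (q21D2 cs).map (· + 1) else (q21D1 cs).map (· + 1)
end

def q21Cmp : Option Nat → Option Nat → Bool
  | none, _ => true
  | some _, none => false
  | some q, some p => p < q

theorem q21Cmp_map (o₁ o₂ : Option Nat) (k : Nat) :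
    q21Cmp (o₁.map (· + k)) (o₂.map (· + k)) = q21Cmp o₁ o₂ := by
  cases o₁ <;> cases o₂ <;> simp [q21Cmp]

theorem q21Cmp_some_zero_left (o : Option Nat) (k : Nat) :
    q21Cmp (some 0) (o.map (· + k.succ)) = false := by
  cases o <;> simp [q21Cmp]

theorem q21Cmp_some_zero_right (o : Option Nat) :
    q21Cmp (o.map (· + 1)) (some 0) = true := by
  cases o <;> simp [q21Cmp]

-- the main invariant: the four reachable states of A's loop, characterised by events
theorem q21LoopA_events (cs : List Char) :
    q21LoopA cs 0 0 = q21Cmp (q21S2 cs) (q21D2 cs) ∧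
    q21LoopA cs 1 0 = q21Cmp (q21S1 cs) (q21D2 cs) ∧
    q21LoopA cs 0 1 = q21Cmp (q21S2 cs) (q21D1 cs) ∧
    q21LoopA cs 1 1 = q21Cmp (q21S1 cs) (q21D1 cs) := by
  induction cs with
  | nil => simp [q21LoopA, q21S1, q21S2, q21D1, q21D2, q21Cmp]
  | cons c cs ih =>
    obtain ⟨ih00, ih10, ih01, ih11⟩ := ih
    by_cases h : c = '0' <;>
      simp [q21LoopA, q21S1, q21S2, q21D1, q21D2, h, ih10, ih01, ih11,
            q21Cmp_map, q21Cmp_some_zero_left, q21Cmp_some_zero_right]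

theorem q21SecondZero_eq (cs : List Char) :
    (∀ i, q21SecondZero cs false i = (q21S2 cs).map (· + i)) ∧
    (∀ i, q21SecondZero cs true i = (q21S1 cs).map (· + i)) := by
  induction cs with
  | nil => simp [q21SecondZero, q21S1, q21S2]
  | cons c cs ih =>
    obtain ⟨ihf, iht⟩ := ih
    constructor <;> intro i <;> by_cases h : c = '0' <;>
      simp [q21SecondZero, q21S1, q21S2, h, ihf, iht] <;> (congr 1; funext x; omega)

theorem q21FirstDouble_eq (cs : List Char) :
    (∀ i, q21FirstDouble cs false i = (q21D2 cs).map (· + i)) ∧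
    (∀ i, q21FirstDouble cs true i = (q21D1 cs).map (· + i)) := by
  induction cs with
  | nil => simp [q21FirstDouble, q21D1, q21D2]
  | cons c cs ih =>
    obtain ⟨ihf, iht⟩ := ih
    constructor <;> intro i <;> by_cases h : c = '0' <;>
      simp [q21FirstDouble, q21D1, q21D2, h, ihf, iht] <;> (congr 1; funext x; omega)

theorem q21_alt_cmp (L : String) :
    question21_alt L = q21Cmp (q21S2 L.toList) (q21D2 L.toList) := by
  have hz := (q21SecondZero_eq L.toList).1 0
  have hd := (q21FirstDouble_eq L.toList).1 0
  simp only [question21_alt, hz, hd]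
  cases q21S2 L.toList <;> cases q21D2 L.toList <;> simp [q21Cmp]

-- ===== VERDICT (by name: the statement is the Claim_ definition above) =====
theorem question21_spec : Claim_equal_question21 := by
  intro L _
  unfold Spec_question21 question21
  rw [q21_alt_cmp, (q21LoopA_events L.toList).1]
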